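-- pv_equiv track=rewrite | github.com/gregschmit/puflib | puflib/util.py | srf_interpret
-- ===== SOURCE A (Python) =====
-- def srf_interpret(v):
--     """
--     0110 -> SRRS
--     """
--     same = True
--     result = []
--     for x in reversed(v):
--         if x:
--             result.append('R')
--             same = not same
--         if not x:
--             result.append('S') if same else result.append('F')
--     return list(reversed(result))
-- ===== SOURCE B (Python) =====
-- def srf_interpret(v):
--     """
--     0110 -> SRRS
--     """
--     total = sum(1 for x in v if x)
--     ones_seen = 0
--     result = []
--     for x in v:
--         if x:
--             result.append('R')
--             ones_seen += 1
--         else: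
--             result.append('S' if (total - ones_seen) % 2 == 0 else 'F')
--     return result
-- ===== Notes on version B (the rewrite author's own statement) =====
-- stated objective: alternative
-- what changed: Replaces A's backward toggle-and-reverse pass with a precomputed count of truthy bits and a single forward pass deciding S/F by the parity of truthy bits still to the right; no list reversal.
import Mathlib
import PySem

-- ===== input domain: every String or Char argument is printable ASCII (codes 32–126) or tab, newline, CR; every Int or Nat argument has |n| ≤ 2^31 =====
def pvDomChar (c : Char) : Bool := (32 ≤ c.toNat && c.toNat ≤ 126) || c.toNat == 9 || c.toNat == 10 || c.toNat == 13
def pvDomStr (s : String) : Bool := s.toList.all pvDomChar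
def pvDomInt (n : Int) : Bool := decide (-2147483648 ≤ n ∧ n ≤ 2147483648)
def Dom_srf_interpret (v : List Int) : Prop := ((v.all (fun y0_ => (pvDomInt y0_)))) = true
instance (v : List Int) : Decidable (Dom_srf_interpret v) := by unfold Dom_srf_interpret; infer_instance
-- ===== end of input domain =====

-- B replaces A's backward toggle-then-reverse pass with a precomputed truthy count and one forward parity pass (alternative decomposition, same cost).

-- ===== PORT A =====
-- A's loop over reversed(v) with the 'same' flag, appending in iteration order; result reversed at the end.
def srfGoA : List Int → Bool → List String
  | [], _ => []
  | x :: xs, same =>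
    if x ≠ 0 then "R" :: srfGoA xs (!same)
    else (if same then "S" else "F") :: srfGoA xs same

def srf_interpret (v : List Int) : List String :=
  (srfGoA v.reverse true).reverse

-- ===== PORT B =====
-- total = sum(1 for x in v if x)
def srfTotal (v : List Int) : Int :=
  v.foldl (fun acc x => if x ≠ 0 then acc + 1 else acc) 0

-- forward loop carrying ones_seen
def srfGoB (total : Int) : List Int → Int → List String
  | [], _ => []
  | x :: xs, seen =>
    if x ≠ 0 then "R" :: srfGoB total xs (seen + 1)
    else (if (total - seen) % 2 == 0 then "S" else "F") :: srfGoB total xs seen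

def srf_interpret_alt (v : List Int) : List String :=
  srfGoB (srfTotal v) v 0

-- ===== PRECONDITION & SPEC =====
def Spec_srf_interpret (v : List Int) (out : List String) : Prop := out = srf_interpret_alt v
instance (v : List Int) (out : List String) : Decidable (Spec_srf_interpret v out) := by unfold Spec_srf_interpret; infer_instance

-- ===== CLAIM (what is proved, stated in full; the proofs are below) =====
def Claim_equal_srf_interpret : Prop := ∀ (v : List Int), Dom_srf_interpret v → Spec_srf_interpret v (srf_interpret v)

-- ===== LEMMAS AND PROOFS =====

-- number of truthy (nonzero) entries
def srfCnt (l : List Int) : Nat := l.countP (fun x => x ≠ 0)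

-- common specification: head letter is decided by the parity of nonzeros to the right
def srfSpec : List Int → List String
  | [] => []
  | x :: xs => (if x ≠ 0 then "R" else if srfCnt xs % 2 = 0 then "S" else "F") :: srfSpec xs

theorem srfCnt_cons (x : Int) (xs : List Int) :
    srfCnt (x :: xs) = (if x ≠ 0 then 1 else 0) + srfCnt xs := by
  simp only [srfCnt, List.countP_cons]
  by_cases h : x = 0 <;> simp [h, Nat.add_comm]

theorem srfGoA_append (l m : List Int) (s : Bool) :
    srfGoA (l ++ m) s = srfGoA l s ++ srfGoA m (if srfCnt l % 2 = 0 then s else !s) := by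
  induction l generalizing s with
  | nil => simp [srfGoA, srfCnt]
  | cons x xs ih =>
    by_cases hx : x ≠ 0
    · simp only [List.cons_append, srfGoA, if_pos hx, ih (!s), srfCnt_cons]
      have : (1 + srfCnt xs) % 2 = 0 ↔ ¬ (srfCnt xs % 2 = 0) := by omega
      by_cases h : srfCnt xs % 2 = 0 <;> simp [h, this]
    · simp only [List.cons_append, srfGoA, if_neg hx, ih s, srfCnt_cons]
      simp

theorem srfCnt_reverse (l : List Int) : srfCnt l.reverse = srfCnt l := by
  simp [srfCnt]

theorem srf_A_spec (v : List Int) : srf_interpret v = srfSpec v := by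
  induction v with
  | nil => simp [srf_interpret, srfGoA, srfSpec]
  | cons x xs ih =>
    have h : (x :: xs).reverse = xs.reverse ++ [x] := by simp
    unfold srf_interpret at ih ⊢
    rw [h, srfGoA_append, srfCnt_reverse]
    by_cases hc : srfCnt xs % 2 = 0 <;> by_cases hx : x ≠ 0 <;>
      simp [hc, hx, srfGoA, srfSpec, ih]

theorem srfTotal_eq (v : List Int) : srfTotal v = (srfCnt v : Int) := by
  have key : ∀ (l : List Int) (acc : Int),
      l.foldl (fun acc x => if x ≠ 0 then acc + 1 else acc) acc = acc + (srfCnt l : Int) := by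
    intro l
    induction l with
    | nil => intro acc; simp [srfCnt]
    | cons x xs ih =>
      intro acc
      rw [List.foldl_cons]
      by_cases hx : x ≠ 0
      · rw [if_pos hx, ih, srfCnt_cons, if_pos hx]; push_cast; ring
      · rw [if_neg hx, ih, srfCnt_cons, if_neg hx]; push_cast; ring
  simpa [srfTotal] using key v 0

theorem srfGoB_spec (l : List Int) (total seen : Int)
    (h : total - seen = (srfCnt l : Int)) : srfGoB total l seen = srfSpec l := by
  induction l generalizing seen with
  | nil => simp [srfGoB, srfSpec]
  | cons x xs ih =>
    by_cases hx : x ≠ 0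
    · have h' : total - (seen + 1) = (srfCnt xs : Int) := by
        rw [srfCnt_cons, if_pos hx] at h; push_cast at h ⊢; omega
      simp [srfGoB, srfSpec, hx, ih _ h']
    · have h' : total - seen = (srfCnt xs : Int) := by
        rw [srfCnt_cons, if_neg hx] at h; push_cast at h ⊢; omega
      have hpar : ((total - seen) % 2 == 0) = decide (srfCnt xs % 2 = 0) := by
        rw [h']; by_cases hp : srfCnt xs % 2 = 0 <;> simp [hp] <;> omega
      simp only [srfGoB, if_neg hx, srfSpec, hpar, ih _ h']
      by_cases hp : srfCnt xs % 2 = 0 <;> simp [hp]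

-- ===== VERDICT (by name: the statement is the Claim_ definition above) =====
theorem srf_interpret_spec : Claim_equal_srf_interpret := by
  intro v _
  unfold Spec_srf_interpret srf_interpret_alt
  rw [srf_A_spec, srfGoB_spec]
  rw [srfTotal_eq]; simp
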